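-- pv_equiv track=rewrite | github.com/uber-research/CRISP | process.py | cssNameHandle
-- ===== SOURCE A (Python) =====
-- def cssNameHandle(str):
--     # Given the call chain, change it into css format with indentation.
--     lst = str.split('->')
--     res = ""
--     for i in range(len(lst)):
--         for j in range(i):
--             res += ' &emsp; '
--         res += lst[i] + '</br>  '
--     return res
-- ===== SOURCE B (Python) =====
-- def cssNameHandle(str):
--     # Same output as A, built in one pass with a running indentation prefix.
--     parts = []
--     prefix = ''
--     for elem in str.split('->'):
--         parts.append(prefix + elem + '</br>  ')
--         prefix += ' &emsp; '
--     return ''.join(parts)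
-- ===== Notes on version B (the rewrite author's own statement) =====
-- stated objective: simpler
-- what changed: Replaces the nested index loops (rebuilding the indentation from scratch for every element) by a single pass that maintains a running indentation prefix and joins the collected pieces once.
import Mathlib
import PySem

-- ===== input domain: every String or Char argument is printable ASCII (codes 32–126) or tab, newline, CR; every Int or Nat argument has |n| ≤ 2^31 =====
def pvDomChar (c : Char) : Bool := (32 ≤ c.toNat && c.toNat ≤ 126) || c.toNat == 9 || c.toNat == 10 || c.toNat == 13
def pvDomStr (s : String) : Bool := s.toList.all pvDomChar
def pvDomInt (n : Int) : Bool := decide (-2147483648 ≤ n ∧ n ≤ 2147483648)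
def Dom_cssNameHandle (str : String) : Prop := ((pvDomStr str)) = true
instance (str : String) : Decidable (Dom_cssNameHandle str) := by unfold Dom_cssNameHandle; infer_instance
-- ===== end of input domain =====

-- B builds the same string in one pass with a running indentation prefix instead of A's nested rebuild; objective: simpler.

-- ===== PORT A =====
def cssNameHandle (str : String) : String :=
  let lst := (PySem.Str.split? str "->").getD []
  (PySem.List.pyRange 0 (lst.length : Int) 1).foldl
    (fun res i =>
      ((PySem.List.pyRange 0 i 1).foldl (fun r _ => r ++ " &emsp; ") res)
        ++ PySem.List.pyGetD lst i "" ++ "</br>  ")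
    ""

-- ===== PORT B =====
def cssNameHandle_alt (str : String) : String :=
  let st : List String × String := ((PySem.Str.split? str "->").getD []).foldl
    (fun (acc : List String × String) elem =>
      (acc.1 ++ [acc.2 ++ elem ++ "</br>  "], acc.2 ++ " &emsp; "))
    ([], "")
  PySem.Str.join "" st.1

-- ===== PRECONDITION & SPEC =====
def Spec_cssNameHandle (str : String) (out : String) : Prop := out = cssNameHandle_alt str
instance (str : String) (out : String) : Decidable (Spec_cssNameHandle str out) := by unfold Spec_cssNameHandle; infer_instance

-- ===== CLAIM (what is proved, stated in full; the proofs are below) =====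
def Claim_equal_cssNameHandle : Prop := ∀ (str : String), Dom_cssNameHandle str → Spec_cssNameHandle str (cssNameHandle str)

-- ===== LEMMAS AND PROOFS =====

-- indentation prefix of depth n
def pvPad : Nat → String
  | 0 => ""
  | n + 1 => pvPad n ++ " &emsp; "

-- the intended output from position k on
def pvS : List String → Nat → String
  | [], _ => ""
  | x :: xs, k => pvPad k ++ x ++ "</br>  " ++ pvS xs (k + 1)

-- the list of pieces B collects, given the current prefix
def pvBuild : List String → String → List String
  | [], _ => []
  | x :: xs, p => (p ++ x ++ "</br>  ") :: pvBuild xs (p ++ " &emsp; ")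

-- plain concatenation of a list of strings
def pvC : List String → String
  | [] => ""
  | x :: xs => x ++ pvC xs

theorem pvPad_comm (n : Nat) : pvPad n ++ " &emsp; " = " &emsp; " ++ pvPad n := by
  induction n with
  | zero => simp [pvPad]
  | succ m ih =>
      show (pvPad m ++ " &emsp; ") ++ " &emsp; " = _
      conv_lhs => rw [ih]
      rw [String.append_assoc]
      rfl

theorem pvPad_succ_left (n : Nat) : pvPad (n + 1) = " &emsp; " ++ pvPad n := by
  rw [show pvPad (n + 1) = pvPad n ++ " &emsp; " from rfl, pvPad_comm]

theorem pv_inner (l : List Int) (r : String) :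
    l.foldl (fun r _ => r ++ " &emsp; ") r = r ++ pvPad l.length := by
  induction l generalizing r with
  | nil => simp [pvPad]
  | cons a t ih =>
      simp only [List.foldl_cons, List.length_cons, ih, pvPad_succ_left, String.append_assoc]

theorem pv_join_chars (L : List (List Char)) : PySem.Chars.join [] L = L.flatten := by
  induction L with
  | nil => rw [PySem.Chars.join_nil]; rfl
  | cons x t ih =>
      cases t with
      | nil => rw [PySem.Chars.join_singleton]; simp
      | cons y r => rw [PySem.Chars.join_cons_cons]; simp [ih]

theorem pv_join_empty (l : List String) : PySem.Str.join "" l = pvC l := by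
  apply String.toList_injective
  rw [PySem.Str.toList_join, show ("" : String).toList = ([] : List Char) from rfl,
    pv_join_chars]
  induction l with
  | nil => rfl
  | cons x t ih => simp [pvC, ih]

theorem pv_Aside (xs : List String) : ∀ (pre : List String) (res : String),
    (PySem.List.pyRange (pre.length : Int) (((pre ++ xs).length : Nat) : Int) 1).foldl
      (fun res i =>
        ((PySem.List.pyRange 0 i 1).foldl (fun r _ => r ++ " &emsp; ") res)
          ++ PySem.List.pyGetD (pre ++ xs) i "" ++ "</br>  ") res
    = res ++ pvS xs pre.length := by
  induction xs with
  | nil =>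
      intro pre res
      rw [PySem.List.pyRange_one_eq_nil (by simp)]
      simp [pvS]
  | cons x t ih =>
      intro pre res
      rw [PySem.List.pyRange_one_cons (by push_cast [List.length_append, List.length_cons]; omega)]
      simp only [List.foldl_cons]
      rw [pv_inner]
      have hget : PySem.List.pyGetD (pre ++ x :: t) (pre.length : Int) "" = x := by
        rw [PySem.List.pyGetD_of_nonneg _ _ (by positivity)]
        simp
      have hlen : (PySem.List.pyRange 0 (pre.length : Int) 1).length = pre.length := by
        simp [PySem.List.length_pyRange_one]
      rw [hlen, hget]
      have hre : pre ++ x :: t = (pre ++ [x]) ++ t := by simp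
      have hca : (pre.length : Int) + 1 = (((pre ++ [x]).length : Nat) : Int) := by
        simp only [List.length_append, List.length_singleton]; push_cast; ring
      rw [hre, hca]
      have := ih (pre ++ [x]) (res ++ pvPad pre.length ++ x ++ "</br>  ")
      rw [this]
      simp [pvS, String.append_assoc]

theorem pv_Bside (xs : List String) : ∀ (parts : List String) (p : String),
    (xs.foldl
      (fun (acc : List String × String) elem =>
        (acc.1 ++ [acc.2 ++ elem ++ "</br>  "], acc.2 ++ " &emsp; "))
      (parts, p)).1 = parts ++ pvBuild xs p := by
  induction xs with
  | nil => intro parts p; simp [pvBuild]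
  | cons x t ih => intro parts p; simp [List.foldl_cons, ih, pvBuild]

theorem pv_CS (xs : List String) : ∀ (k : Nat), pvC (pvBuild xs (pvPad k)) = pvS xs k := by
  induction xs with
  | nil => intro k; rfl
  | cons x t ih =>
      intro k
      show (pvPad k ++ x ++ "</br>  ") ++ pvC (pvBuild t (pvPad k ++ " &emsp; ")) = _
      have : pvPad k ++ " &emsp; " = pvPad (k + 1) := rfl
      rw [this, ih (k + 1)]
      simp [pvS, String.append_assoc]

theorem pv_core (lst : List String) :
    (PySem.List.pyRange 0 (lst.length : Int) 1).foldl
      (fun res i =>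
        ((PySem.List.pyRange 0 i 1).foldl (fun r _ => r ++ " &emsp; ") res)
          ++ PySem.List.pyGetD lst i "" ++ "</br>  ") ""
    = PySem.Str.join ""
        ((lst.foldl
          (fun (acc : List String × String) elem =>
            (acc.1 ++ [acc.2 ++ elem ++ "</br>  "], acc.2 ++ " &emsp; "))
          ([], "")).1) := by
  have ha := pv_Aside lst [] ""
  simp only [List.nil_append, List.length_nil, Nat.cast_zero] at ha
  have hb := pv_Bside lst [] ""
  rw [ha, hb, pv_join_empty, List.nil_append,
    show pvBuild lst "" = pvBuild lst (pvPad 0) from rfl, pv_CS lst 0]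
  exact String.empty_append

-- ===== VERDICT (by name: the statement is the Claim_ definition above) =====
theorem cssNameHandle_spec : Claim_equal_cssNameHandle := by
  intro str _
  show cssNameHandle str = cssNameHandle_alt str
  unfold cssNameHandle cssNameHandle_alt
  exact pv_core ((PySem.Str.split? str "->").getD [])
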